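-- pv_equiv track=rewrite | github.com/TCameron/XML-Script | usaid-data-xml.py | activities_loop
-- ===== SOURCE A (Python) =====
-- def activities_loop(allids):
--     """
--     Find which activities are the main ones to set as hierarchy 1.
--     :param allids: All of the identifiers, without the award numbers.
--     :return rows: The index numbers corresponding to the rows.
--     """
--     rows = list()
--     actives = list()
--     for i in range(0, len(allids)):
--         if allids[i] not in actives:
--             actives.append(allids[i])
--             rows.append(i)
--     return rows
-- ===== SOURCE B (Python) =====
-- def activities_loop(allids):
--     """
--     Find which activities are the main ones to set as hierarchy 1.
--     :param allids: All of the identifiers, without the award numbers.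
--     :return rows: The index numbers corresponding to the rows.
--     """
--     first = {v: i for i, v in reversed(list(enumerate(allids)))}
--     return sorted(first.values())
-- ===== Notes on version B (the rewrite author's own statement) =====
-- stated objective: faster
-- what changed: Replaces the quadratic seen-list membership loop with a dict comprehension over the reversed enumeration (overwriting keeps each value's first index) followed by sorting the dict's values.
import Mathlib
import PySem

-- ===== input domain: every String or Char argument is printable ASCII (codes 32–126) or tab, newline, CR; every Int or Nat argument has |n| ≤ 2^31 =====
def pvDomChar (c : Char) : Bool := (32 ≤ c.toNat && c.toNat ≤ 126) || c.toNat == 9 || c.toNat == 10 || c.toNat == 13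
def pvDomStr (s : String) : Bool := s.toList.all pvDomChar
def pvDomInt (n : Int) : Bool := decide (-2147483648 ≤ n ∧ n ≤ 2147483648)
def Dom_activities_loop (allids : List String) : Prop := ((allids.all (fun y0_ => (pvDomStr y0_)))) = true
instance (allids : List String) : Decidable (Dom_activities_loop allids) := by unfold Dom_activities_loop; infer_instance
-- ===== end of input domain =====

-- B builds a value->first-index dict by one backwards pass (overwrite keeps the
-- first occurrence) and sorts its values: O(n log n) vs A's quadratic seen-list scan.


-- ===== PORT A =====
-- for i in range(0, len(allids)): if allids[i] not in actives: append to both lists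
def activities_loop (allids : List String) : List Int :=
  ((PySem.List.pyRange 0 (allids.length : Int) 1).foldl
    (fun (st : List Int × List String) i =>
      let v := PySem.List.pyGetD allids i ""   -- index always in range here
      if v ∈ st.2 then st else (st.1 ++ [i], st.2 ++ [v]))
    ([], [])).1

-- ===== PORT B =====
-- first = {v: i for i, v in reversed(list(enumerate(allids)))}; return sorted(first.values())
def activities_loop_alt (allids : List String) : List Int :=
  let first := ((PySem.List.enumerate allids 0).reverse).foldl
    (fun (d : PySem.Dict String Int) p => d.insert p.2 p.1) PySem.Dict.empty
  PySem.List.sorted first.values (fun x => x) false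

-- ===== PRECONDITION & SPEC =====
def Spec_activities_loop (allids : List String) (out : List Int) : Prop := out = activities_loop_alt allids
instance (allids : List String) (out : List Int) : Decidable (Spec_activities_loop allids out) := by unfold Spec_activities_loop; infer_instance

-- ===== CLAIM (what is proved, stated in full; the proofs are below) =====
def Claim_equal_activities_loop : Prop := ∀ (allids : List String), Dom_activities_loop allids → Spec_activities_loop allids (activities_loop allids)

-- ===== LEMMAS AND PROOFS =====

-- the common yardstick: indices that are the first occurrence of their value
def pvC (l : List String) : List Int :=
  ((PySem.List.enumerate l 0).filter
    (fun p => (PySem.List.index? l p.2).map (fun k => (k : Int)) == some p.1)).map (·.1)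

-- first-occurrence "seen" list of A, fed forward
def pvSeen (l : List String) : List String :=
  l.foldl (fun acc v => if v ∈ acc then acc else acc ++ [v]) []

lemma pvSeen_mem_gen (l acc : List String) (v : String) :
    v ∈ l.foldl (fun acc v => if v ∈ acc then acc else acc ++ [v]) acc ↔ v ∈ acc ∨ v ∈ l := by
  induction l generalizing acc with
  | nil => simp
  | cons x xs ih =>
    simp only [List.foldl_cons, ih]
    by_cases hx : x ∈ acc <;> simp [hx] <;> aesop

lemma pvSeen_mem (l : List String) (v : String) : v ∈ pvSeen l ↔ v ∈ l := by
  simpa using pvSeen_mem_gen l [] v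

-- ---- A = pvC ----
lemma pvA_eq (l : List String) :
    ((PySem.List.pyRange 0 (l.length : Int) 1).foldl
      (fun (st : List Int × List String) i =>
        let v := PySem.List.pyGetD l i ""
        if v ∈ st.2 then st else (st.1 ++ [i], st.2 ++ [v]))
      ([], [])) = (pvC l, pvSeen l) := by
  induction l using List.reverseRecOn with
  | nil => decide
  | append_singleton l x ih =>
    have hlen : ((l ++ [x]).length : Int) = (l.length : Int) + 1 := by
      simp only [List.length_append, List.length_cons, List.length_nil]
      push_cast; ring
    rw [hlen, PySem.List.pyRange_one_succ_right (by positivity), List.foldl_append]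
    have hcongr : (PySem.List.pyRange 0 (l.length : Int) 1).foldl
        (fun (st : List Int × List String) i =>
          let v := PySem.List.pyGetD (l ++ [x]) i ""
          if v ∈ st.2 then st else (st.1 ++ [i], st.2 ++ [v])) ([], []) =
        (PySem.List.pyRange 0 (l.length : Int) 1).foldl
        (fun (st : List Int × List String) i =>
          let v := PySem.List.pyGetD l i ""
          if v ∈ st.2 then st else (st.1 ++ [i], st.2 ++ [v])) ([], []) := by
      apply PySem.List.foldl_congr_mem
      intro acc i hi
      rw [PySem.List.mem_pyRange_one] at hi
      have h0 : (0:Int) ≤ i := hi.1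
      have h1 : i < (l.length : Int) := hi.2
      have : PySem.List.pyGetD (l ++ [x]) i "" = PySem.List.pyGetD l i "" := by
        rw [PySem.List.pyGetD_eq_getElem (l ++ [x]) "" h0 (by simp only [List.length_append, List.length_cons, List.length_nil]; push_cast; omega),
            PySem.List.pyGetD_eq_getElem l "" h0 h1]
        rw [List.getElem_append_left]
      simp only [this]
    rw [hcongr, ih]
    have hx : PySem.List.pyGetD (l ++ [x]) (l.length : Int) "" = x := by
      rw [PySem.List.pyGetD_eq_getElem (l ++ [x]) "" (by positivity) (by simp only [List.length_append, List.length_cons, List.length_nil]; push_cast; omega)]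
      simp
    have hseen : pvSeen (l ++ [x]) =
        (if x ∈ pvSeen l then pvSeen l else pvSeen l ++ [x]) := by
      unfold pvSeen; rw [List.foldl_append]; simp
    have henum : PySem.List.enumerate (l ++ [x]) 0 =
        PySem.List.enumerate l 0 ++ [((l.length : Int), x)] := by
      rw [PySem.List.enumerate_append]
      simp [PySem.List.enumerate]
    have hfiltcongr : (PySem.List.enumerate l 0).filter
        (fun p => (PySem.List.index? (l ++ [x]) p.2).map (fun k => (k : Int)) == some p.1) =
        (PySem.List.enumerate l 0).filter
        (fun p => (PySem.List.index? l p.2).map (fun k => (k : Int)) == some p.1) := by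
      apply List.filter_congr
      intro p hp
      rw [PySem.List.mem_enumerate_iff] at hp
      obtain ⟨k, hk, rfl⟩ := hp
      rw [PySem.List.index?_append_of_mem [x] (List.getElem_mem hk)]
    by_cases hmem : x ∈ l
    · have hx1 : x ∈ pvSeen l := (pvSeen_mem l x).mpr hmem
      have hidx : PySem.List.index? (l ++ [x]) x = PySem.List.index? l x :=
        PySem.List.index?_append_of_mem [x] hmem
      obtain ⟨k, hk⟩ := Option.isSome_iff_exists.mp ((PySem.List.index?_isSome_iff l x).mpr hmem)
      obtain ⟨hklt, -, -⟩ := PySem.List.getElem_of_index?_eq_some hk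
      have h2 : List.idxOf? x (l ++ [x]) = some k := by
        rw [← PySem.List.index?_eq_idxOf?, hidx, hk]
      unfold pvC
      rw [henum, List.filter_append, hfiltcongr]
      simp [hx, hseen, hx1, h2]
      omega
    · have hx1 : x ∉ pvSeen l := fun h => hmem ((pvSeen_mem l x).mp h)
      have h2 : List.idxOf? x (l ++ [x]) = some l.length := by
        rw [← PySem.List.index?_eq_idxOf?, PySem.List.index?_append_singleton_self _ _ hmem]
      unfold pvC
      rw [henum, List.filter_append, hfiltcongr]
      simp [hx, hseen, hx1, h2]

-- ---- B = pvC ----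
-- the dict B builds, written as a foldr (= the foldl over the reversed enumeration)
def pvD (ps : List (Int × String)) : PySem.Dict String Int :=
  ps.foldr (fun p d => d.insert p.2 p.1) PySem.Dict.empty

lemma pvD_eq_foldl (ps : List (Int × String)) :
    ps.reverse.foldl (fun (d : PySem.Dict String Int) p => d.insert p.2 p.1) PySem.Dict.empty
      = pvD ps := by
  rw [List.foldl_reverse]; rfl

lemma pvD_get? (l : List String) (s : Int) (v : String) :
    (pvD (PySem.List.enumerate l s)).get? v
      = (PySem.List.index? l v).map (fun k => s + (k : Int)) := by
  induction l generalizing s with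
  | nil => simp [pvD, PySem.List.enumerate, PySem.List.index?]
  | cons x xs ih =>
    rw [PySem.List.enumerate_cons]
    show ((pvD (PySem.List.enumerate xs (s+1))).insert x s).get? v = _
    by_cases hvx : v = x
    · subst hvx
      rw [PySem.Dict.get?_insert_self, PySem.List.index?_cons_self]
      simp
    · rw [PySem.Dict.get?_insert_of_ne _ _ hvx, ih,
          PySem.List.index?_cons_of_ne _ (fun h => hvx h.symm)]
      cases PySem.List.index? xs v with
      | none => rfl
      | some k => simp; omega

lemma pvD_nodup_keys (l : List String) :
    (pvD (PySem.List.enumerate l 0)).keys.Nodup := by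
  rw [← pvD_eq_foldl]
  exact PySem.Dict.nodup_keys_foldl_insert_key ((PySem.List.enumerate l 0).reverse)
    (fun p : Int × String => p.2) (fun _ p => p.1) PySem.Dict.empty
    PySem.Dict.nodup_keys_empty

lemma pv_mem_C_pairs (l : List String) (p : Int × String) :
    p ∈ (PySem.List.enumerate l 0).filter
        (fun p => (PySem.List.index? l p.2).map (fun k => (k : Int)) == some p.1)
      ↔ (PySem.List.index? l p.2).map (fun k => (k : Int)) = some p.1 := by
  constructor
  · intro h
    exact eq_of_beq ((List.mem_filter.mp h).2)
  · intro h
    apply List.mem_filter.mpr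
    refine ⟨?_, beq_iff_eq.mpr h⟩
    cases hidx : PySem.List.index? l p.2 with
    | none => rw [hidx] at h; simp at h
    | some k =>
      rw [hidx] at h
      simp at h
      obtain ⟨hklt, hget, -⟩ := PySem.List.getElem_of_index?_eq_some hidx
      rw [PySem.List.mem_enumerate_iff]
      refine ⟨k, hklt, ?_⟩
      obtain ⟨p1, p2⟩ := p
      simp_all
lemma pv_items_perm (l : List String) :
    (pvD (PySem.List.enumerate l 0)).items.Perm
      (((PySem.List.enumerate l 0).filter
        (fun p => (PySem.List.index? l p.2).map (fun k => (k : Int)) == some p.1)).map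
          (fun p => (p.2, p.1))) := by
  have hnd : (pvD (PySem.List.enumerate l 0)).keys.Nodup := pvD_nodup_keys l
  have hnd1 : (pvD (PySem.List.enumerate l 0)).items.Nodup :=
    hnd.of_map (f := Prod.fst)
  have hnd2 : (((PySem.List.enumerate l 0).filter
        (fun p => (PySem.List.index? l p.2).map (fun k => (k : Int)) == some p.1)).map
          (fun p => (p.2, p.1))).Nodup := by
    apply List.Nodup.map
    · intro a b hab
      obtain ⟨a1, a2⟩ := a; obtain ⟨b1, b2⟩ := b
      simpa [Prod.ext_iff, and_comm] using hab
    · have hn : (PySem.List.enumerate l 0).Nodup :=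
        (PySem.List.pairwise_lt_enumerate l 0).imp
          (fun h he => by subst he; exact lt_irrefl _ h)
      exact hn.filter _
  rw [List.perm_ext_iff_of_nodup hnd1 hnd2]
  intro ⟨v, i⟩
  rw [PySem.Dict.get?_eq_some_iff_mem_items _ _ _ hnd |>.symm, pvD_get?]
  constructor
  · intro h
    apply List.mem_map.mpr
    refine ⟨(i, v), ?_, rfl⟩
    rw [pv_mem_C_pairs]
    simpa using h
  · intro h
    obtain ⟨⟨i', v'⟩, hmem, heq⟩ := List.mem_map.mp h
    obtain ⟨rfl, rfl⟩ : v' = v ∧ i' = i := by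
      simpa [Prod.ext_iff, and_comm] using heq
    rw [pv_mem_C_pairs] at hmem
    simpa using hmem

lemma pvC_pairwise (l : List String) : (pvC l).Pairwise (· < ·) := by
  unfold pvC
  exact List.Pairwise.map _ (fun a b h => h)
    ((PySem.List.pairwise_lt_enumerate l 0).filter _)

lemma pvB_eq (l : List String) : activities_loop_alt l = pvC l := by
  unfold activities_loop_alt
  rw [pvD_eq_foldl]
  have hperm : (pvC l).Perm (pvD (PySem.List.enumerate l 0)).values := by
    have := (pv_items_perm l).map (fun p : String × Int => p.2)
    have hv : (pvD (PySem.List.enumerate l 0)).values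
        = (pvD (PySem.List.enumerate l 0)).items.map (fun p => p.2) := rfl
    rw [hv]
    refine (List.Perm.symm ?_)
    simpa [Function.comp, pvC, List.map_map] using this
  exact PySem.List.sorted_eq_of_perm_of_pairwise_lt _ _ _ hperm (pvC_pairwise l)

-- ===== VERDICT (by name: the statement is the Claim_ definition above) =====
theorem activities_loop_spec : Claim_equal_activities_loop := by
  intro allids _
  unfold Spec_activities_loop activities_loop
  rw [pvA_eq, pvB_eq]
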